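-- pv_equiv track=rewrite | github.com/zhangjiaxuan-Xuan/VLA-2 | script/mmgdino_simple.py | delete_color
-- ===== SOURCE A (Python) =====
-- def delete_color(tasklist: list[str]) -> list[str]:
--     """
--     Remove all color+mask prompt words from each string in the list
--
--     For example:
--     "red mask apple" -> "apple"
--     "blue mask banana green mask orange" -> "banana orange"
--     "mask apple yellow mask banana" -> "apple banana"
--     """
--     tasklist_nocolor = []
--
--     for task in tasklist:
--         words = task.split()
--         to_remove = set()  # Use set to store indices to be removed
--
--         # Find positions of all "mask" and their corresponding color words
--         for i, word in enumerate(words):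
--             if word.lower() == "mask":
--                 to_remove.add(i)  # Add mask index
--                 if i > 0:
--                     to_remove.add(i-1)  # Add index of word before mask
--
--         # Keep words not marked for deletion
--         filtered_words = [word for i, word in enumerate(words) if i not in to_remove]
--         tasklist_nocolor.append(" ".join(filtered_words))
--
--     return tasklist_nocolor
-- ===== SOURCE B (Python) =====
-- def delete_color(tasklist: list[str]) -> list[str]:
--     """Single pass with look-ahead: keep a word only if neither it nor the next word is 'mask'."""
--     result = []
--     for task in tasklist:
--         words = task.split()
--         kept = [w for i, w in enumerate(words)
--                 if w.lower() != "mask"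
--                 and (i + 1 >= len(words) or words[i + 1].lower() != "mask")]
--         result.append(" ".join(kept))
--     return result
-- ===== Notes on version B (the rewrite author's own statement) =====
-- stated objective: simpler
-- what changed: Replaces A's two-pass scheme (collect removal indices into a set, then filter by set membership) with a single comprehension using a local look-ahead: keep word i iff it is not 'mask' and the following word is not 'mask'.
import Mathlib
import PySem

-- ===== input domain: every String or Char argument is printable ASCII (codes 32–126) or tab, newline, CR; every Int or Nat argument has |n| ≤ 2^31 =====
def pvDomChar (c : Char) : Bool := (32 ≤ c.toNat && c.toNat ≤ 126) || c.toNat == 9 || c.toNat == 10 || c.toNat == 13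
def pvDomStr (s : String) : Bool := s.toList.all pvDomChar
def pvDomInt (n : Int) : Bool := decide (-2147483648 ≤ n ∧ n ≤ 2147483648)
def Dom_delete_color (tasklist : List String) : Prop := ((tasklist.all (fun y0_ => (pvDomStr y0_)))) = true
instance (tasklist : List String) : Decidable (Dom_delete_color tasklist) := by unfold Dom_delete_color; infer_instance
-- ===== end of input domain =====

-- B replaces A's two-pass index-set-then-filter with a single-pass look-ahead filter (objective: simpler).

-- ===== PORT A =====
-- the 'for i, word in enumerate(words): if word.lower() == "mask": …' loop building to_remove
def pvMaskSet (words : List String) : PySem.Set Int :=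
  (PySem.List.enumerate words).foldl
    (fun s iw =>
      if PySem.Str.lower iw.2 == "mask" then
        let s := PySem.Set.add s iw.1
        if iw.1 > 0 then PySem.Set.add s (iw.1 - 1) else s
      else s)
    PySem.Set.empty

def delete_color (tasklist : List String) : List String :=
  tasklist.foldl
    (fun acc task =>
      let words := PySem.Str.split₀ task
      let to_remove := pvMaskSet words
      let filtered :=
        ((PySem.List.enumerate words).filter
          (fun iw => ¬ PySem.Set.contains to_remove iw.1)).map (·.2)
      acc ++ [PySem.Str.join " " filtered])
    []

-- ===== PORT B =====
def delete_color_alt (tasklist : List String) : List String :=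
  tasklist.foldl
    (fun acc task =>
      let words := PySem.Str.split₀ task
      let kept :=
        ((PySem.List.enumerate words).filter
          (fun iw =>
            PySem.Str.lower iw.2 ≠ "mask" ∧
            (iw.1 + 1 ≥ (words.length : Int) ∨
              -- guard above ensures the index is in range, so the total getD is exact for words[i+1]
              PySem.Str.lower (PySem.List.pyGetD words (iw.1 + 1) "") ≠ "mask"))).map (·.2)
      acc ++ [PySem.Str.join " " kept])
    []

-- ===== PRECONDITION & SPEC =====
def Spec_delete_color (tasklist : List String) (out : List String) : Prop := out = delete_color_alt tasklist
instance (tasklist : List String) (out : List String) : Decidable (Spec_delete_color tasklist out) := by unfold Spec_delete_color; infer_instance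

-- ===== CLAIM (what is proved, stated in full; the proofs are below) =====
def Claim_equal_delete_color : Prop := ∀ (tasklist : List String), Dom_delete_color tasklist → Spec_delete_color tasklist (delete_color tasklist)

-- ===== LEMMAS AND PROOFS =====

-- membership in the removal set built by A's first pass
theorem mem_maskFold (ws : List String) (s : Int) (acc : PySem.Set Int) (j : Int) :
    j ∈ (PySem.List.enumerate ws s).foldl
      (fun s iw =>
        if PySem.Str.lower iw.2 == "mask" then
          let s := PySem.Set.add s iw.1
          if iw.1 > 0 then PySem.Set.add s (iw.1 - 1) else s
        else s) acc ↔
    j ∈ acc ∨ ∃ k : Nat, ∃ _ : k < ws.length,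
      PySem.Str.lower ws[k] = "mask" ∧ (j = s + k ∨ (s + k > 0 ∧ j = s + k - 1)) := by
  induction ws generalizing s acc with
  | nil => simp [PySem.List.enumerate]
  | cons w ws ih =>
    rw [PySem.List.enumerate_cons, List.foldl_cons, ih]
    by_cases hm : PySem.Str.lower w = "mask"
    · simp only [hm, beq_self_eq_true, if_true]
      by_cases hs : s > 0
      · simp only [hs, if_pos, PySem.Set.mem_add]
        constructor
        · rintro (((h | h) | h) | ⟨k, hk, hmask, hj⟩)
          · exact Or.inl h
          · refine Or.inr ⟨0, ?_, by simpa using hm, ?_⟩ <;> first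
                | (simp only [List.length_cons] at hk ⊢ <;> omega)
                | (simp only [List.length_cons] <;> omega)
                | (push_cast at hj ⊢ <;> omega)
                | (push_cast <;> omega)
                | (exact Or.inl (by push_cast <;> omega))
                | (exact Or.inr ⟨by push_cast <;> omega, by push_cast <;> omega⟩)
                | omega
          · refine Or.inr ⟨0, ?_, by simpa using hm, ?_⟩ <;> first
                | (simp only [List.length_cons] at hk ⊢ <;> omega)
                | (simp only [List.length_cons] <;> omega)
                | (push_cast at hj ⊢ <;> omega)
                | (push_cast <;> omega)
                | (exact Or.inl (by push_cast <;> omega))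
                | (exact Or.inr ⟨by push_cast <;> omega, by push_cast <;> omega⟩)
                | omega
          · refine Or.inr ⟨k + 1, ?_, by simpa using hmask, ?_⟩ <;> first
                | (simp only [List.length_cons] at hk ⊢ <;> omega)
                | (simp only [List.length_cons] <;> omega)
                | (push_cast at hj ⊢ <;> omega)
                | (push_cast <;> omega)
                | (exact Or.inl (by push_cast <;> omega))
                | (exact Or.inr ⟨by push_cast <;> omega, by push_cast <;> omega⟩)
                | omega
        · rintro (h | ⟨k, hk, hmask, hj⟩)
          · exact Or.inl (Or.inl (Or.inl h))
          · match k with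
            | 0 =>
              simp only [List.getElem_cons_zero] at hmask
              rcases hj with hj | ⟨_, hj⟩
              · refine Or.inl (Or.inl (Or.inr ?_)); omega
              · refine Or.inl (Or.inr ?_); omega
            | k + 1 =>
              refine Or.inr ⟨k, ?_, by simpa using hmask, ?_⟩ <;> first
                | (simp only [List.length_cons] at hk ⊢ <;> omega)
                | (simp only [List.length_cons] <;> omega)
                | (push_cast at hj ⊢ <;> omega)
                | (push_cast <;> omega)
                | (exact Or.inl (by push_cast <;> omega))
                | (exact Or.inr ⟨by push_cast <;> omega, by push_cast <;> omega⟩)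
                | omega
      · simp only [hs, if_neg, PySem.Set.mem_add, not_false_iff]
        constructor
        · rintro ((h | h) | ⟨k, hk, hmask, hj⟩)
          · exact Or.inl h
          · refine Or.inr ⟨0, ?_, by simpa using hm, ?_⟩ <;> first
                | (simp only [List.length_cons] at hk ⊢ <;> omega)
                | (simp only [List.length_cons] <;> omega)
                | (push_cast at hj ⊢ <;> omega)
                | (push_cast <;> omega)
                | (exact Or.inl (by push_cast <;> omega))
                | (exact Or.inr ⟨by push_cast <;> omega, by push_cast <;> omega⟩)
                | omega
          · refine Or.inr ⟨k + 1, ?_, by simpa using hmask, ?_⟩ <;> first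
                | (simp only [List.length_cons] at hk ⊢ <;> omega)
                | (simp only [List.length_cons] <;> omega)
                | (push_cast at hj ⊢ <;> omega)
                | (push_cast <;> omega)
                | (exact Or.inl (by push_cast <;> omega))
                | (exact Or.inr ⟨by push_cast <;> omega, by push_cast <;> omega⟩)
                | omega
        · rintro (h | ⟨k, hk, hmask, hj⟩)
          · exact Or.inl (Or.inl h)
          · match k with
            | 0 =>
              simp only [List.getElem_cons_zero] at hmask
              rcases hj with hj | ⟨hpos, hj⟩
              · refine Or.inl (Or.inr ?_); omega
              · omega
            | k + 1 =>
              refine Or.inr ⟨k, ?_, by simpa using hmask, ?_⟩ <;> first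
                | (simp only [List.length_cons] at hk ⊢ <;> omega)
                | (simp only [List.length_cons] <;> omega)
                | (push_cast at hj ⊢ <;> omega)
                | (push_cast <;> omega)
                | (exact Or.inl (by push_cast <;> omega))
                | (exact Or.inr ⟨by push_cast <;> omega, by push_cast <;> omega⟩)
                | omega
    · simp only [hm, if_neg, beq_iff_eq, not_false_iff]
      constructor
      · rintro (h | ⟨k, hk, hmask, hj⟩)
        · exact Or.inl h
        · refine Or.inr ⟨k + 1, ?_, by simpa using hmask, ?_⟩ <;> first
                | (simp only [List.length_cons] at hk ⊢ <;> omega)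
                | (simp only [List.length_cons] <;> omega)
                | (push_cast at hj ⊢ <;> omega)
                | (push_cast <;> omega)
                | (exact Or.inl (by push_cast <;> omega))
                | (exact Or.inr ⟨by push_cast <;> omega, by push_cast <;> omega⟩)
                | omega
      · rintro (h | ⟨k, hk, hmask, hj⟩)
        · exact Or.inl h
        · match k with
          | 0 => simp only [List.getElem_cons_zero] at hmask; exact absurd hmask hm
          | k + 1 =>
            refine Or.inr ⟨k, ?_, by simpa using hmask, ?_⟩ <;> first
                | (simp only [List.length_cons] at hk ⊢ <;> omega)
                | (simp only [List.length_cons] <;> omega)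
                | (push_cast at hj ⊢ <;> omega)
                | (push_cast <;> omega)
                | (exact Or.inl (by push_cast <;> omega))
                | (exact Or.inr ⟨by push_cast <;> omega, by push_cast <;> omega⟩)
                | omega

theorem mem_pvMaskSet (ws : List String) (j : Int) :
    j ∈ pvMaskSet ws ↔ ∃ k : Nat, ∃ _ : k < ws.length,
      PySem.Str.lower ws[k] = "mask" ∧ (j = k ∨ (0 < k ∧ j = (k : Int) - 1)) := by
  unfold pvMaskSet
  rw [mem_maskFold]
  simp only [PySem.Set.empty, List.not_mem_nil, false_or, zero_add]
  constructor
  · rintro ⟨k, hk, hm, hj⟩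
    exact ⟨k, hk, hm, by omega⟩
  · rintro ⟨k, hk, hm, hj⟩
    exact ⟨k, hk, hm, by omega⟩

-- at an in-range index k, A's removal test equals the negation of B's keep test
theorem keep_iff (ws : List String) (k : Nat) (hk : k < ws.length) :
    (¬ PySem.Set.contains (pvMaskSet ws) (k : Int)) ↔
    (PySem.Str.lower ws[k] ≠ "mask" ∧
      ((k : Int) + 1 ≥ (ws.length : Int) ∨
        PySem.Str.lower (PySem.List.pyGetD ws ((k : Int) + 1) "") ≠ "mask")) := by
  rw [PySem.Set.contains_iff, mem_pvMaskSet]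
  constructor
  · intro h
    constructor
    · intro hm
      exact h ⟨k, hk, hm, Or.inl rfl⟩
    · by_cases hlt : k + 1 < ws.length
      · refine Or.inr (fun hm => h ⟨k + 1, hlt, ?_, Or.inr ⟨by omega, by push_cast; omega⟩⟩)
        have : ((k : Int) + 1) = ((k + 1 : Nat) : Int) := by push_cast; omega
        rwa [this, PySem.List.pyGetD_natCast, List.getD_eq_getElem _ _ hlt] at hm
      · exact Or.inl (by omega)
  · rintro ⟨h1, h2⟩ ⟨m, hm, hmask, hj⟩
    rcases hj with hj | ⟨hpos, hj⟩
    · have : m = k := by omega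
      subst this; exact h1 hmask
    · have hmk : m = k + 1 := by omega
      subst hmk
      rcases h2 with h2 | h2
      · omega
      · apply h2
        have : ((k : Int) + 1) = ((k + 1 : Nat) : Int) := by push_cast; omega
        rw [this, PySem.List.pyGetD_natCast, List.getD_eq_getElem _ _ hm]
        exact hmask

theorem per_task (task : String) :
    (let words := PySem.Str.split₀ task
     PySem.Str.join " " (((PySem.List.enumerate words).filter
       (fun iw => ¬ PySem.Set.contains (pvMaskSet words) iw.1)).map (·.2))) =
    (let words := PySem.Str.split₀ task
     PySem.Str.join " " (((PySem.List.enumerate words).filter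
       (fun iw =>
         PySem.Str.lower iw.2 ≠ "mask" ∧
         (iw.1 + 1 ≥ (words.length : Int) ∨
           PySem.Str.lower (PySem.List.pyGetD words (iw.1 + 1) "") ≠ "mask"))).map (·.2))) := by
  simp only
  congr 1
  congr 1
  apply List.filter_congr
  intro iw hmem
  rw [PySem.List.mem_enumerate_iff] at hmem
  obtain ⟨k, hk, rfl⟩ := hmem
  simp only [zero_add]
  rw [decide_eq_decide]
  exact keep_iff _ k hk

-- ===== VERDICT (by name: the statement is the Claim_ definition above) =====
theorem delete_color_spec : Claim_equal_delete_color := by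
  intro tasklist hdom
  unfold Spec_delete_color delete_color delete_color_alt
  induction tasklist using List.reverseRecOn with
  | nil => rfl
  | append_singleton xs x ih =>
    have hdx : Dom_delete_color xs := by
      unfold Dom_delete_color at hdom ⊢
      simp only [List.all_append] at hdom
      exact (Bool.and_eq_true_iff.mp hdom).1
    rw [List.foldl_append, List.foldl_append, ih hdx]
    simp only [List.foldl_cons, List.foldl_nil]
    exact congrArg (fun y => _ ++ [y]) (per_task x)
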